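-- pv_equiv track=rewrite | github.com/Rider66code/PythonForEverybody | bin/p3p_c2w4_ex_010.py | beginning
-- ===== SOURCE A (Python) =====
-- def beginning(chk_list):
--     tmp_list=[]
--     tmp_val=0
--     counter=0
--     while (counter<len(chk_list)) and (chk_list[counter]!='bye'):
--         tmp_list.append(chk_list[counter])
--         counter+=1
--         if len(tmp_list)>=10:
--             break
--     return tmp_list
-- ===== SOURCE B (Python) =====
-- def beginning(chk_list):
--     idx = chk_list.index('bye') if 'bye' in chk_list else len(chk_list)
--     return chk_list[:min(idx, 10)]
-- ===== Notes on version B (the rewrite author's own statement) =====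
-- stated objective: simpler
-- what changed: Replaces the element-by-element while loop with append and break by computing the cut index ('bye' position or list length) up front and returning a single slice chk_list[:min(idx,10)].
import Mathlib
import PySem

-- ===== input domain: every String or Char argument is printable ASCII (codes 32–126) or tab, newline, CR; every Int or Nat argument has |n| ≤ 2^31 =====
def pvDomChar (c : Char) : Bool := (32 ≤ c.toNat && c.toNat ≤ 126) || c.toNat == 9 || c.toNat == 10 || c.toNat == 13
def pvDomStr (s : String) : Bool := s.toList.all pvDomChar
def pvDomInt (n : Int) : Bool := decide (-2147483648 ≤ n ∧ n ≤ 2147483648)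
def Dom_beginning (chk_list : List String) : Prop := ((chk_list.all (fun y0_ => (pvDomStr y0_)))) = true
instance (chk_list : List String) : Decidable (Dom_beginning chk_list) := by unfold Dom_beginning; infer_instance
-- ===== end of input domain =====

-- B replaces A's element-by-element while loop with computing the cut index ("bye" position or length) up front and taking one slice; objective: simpler.


-- ===== PORT A =====
-- loop: while (counter < len) and (chk_list[counter] != 'bye'): append; counter+=1; break if len(tmp)>=10
def beginningLoop (chk_list tmp_list : List String) (counter : Nat) : List String :=
  if h : counter < chk_list.length ∧ chk_list[counter]! ≠ "bye" then
    let tmp_list' := tmp_list ++ [chk_list[counter]!]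
    if tmp_list'.length ≥ 10 then tmp_list'
    else beginningLoop chk_list tmp_list' (counter + 1)
  else tmp_list
termination_by chk_list.length - counter
decreasing_by omega

def beginning (chk_list : List String) : List String :=
  beginningLoop chk_list [] 0

-- ===== PORT B =====
-- idx = chk_list.index('bye') if 'bye' in chk_list else len(chk_list); return chk_list[:min(idx,10)]
def beginning_alt (chk_list : List String) : List String :=
  let idx := match PySem.List.index? chk_list "bye" with
    | some i => i
    | none => chk_list.length
  chk_list.take (min idx 10)

-- ===== PRECONDITION & SPEC =====
def Spec_beginning (chk_list : List String) (out : List String) : Prop := out = beginning_alt chk_list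
instance (chk_list : List String) (out : List String) : Decidable (Spec_beginning chk_list out) := by unfold Spec_beginning; infer_instance

-- ===== CLAIM (what is proved, stated in full; the proofs are below) =====
def Claim_equal_beginning : Prop := ∀ (chk_list : List String), Dom_beginning chk_list → Spec_beginning chk_list (beginning chk_list)

-- ===== LEMMAS AND PROOFS =====

-- ===== VERDICT (by name: the statement is the Claim_ definition above) =====
-- cut = first index of "bye", or length if absent
def pvCut (xs : List String) : Nat := xs.findIdx (· = "bye")

theorem pvCut_le (xs : List String) : pvCut xs ≤ xs.length :=
  List.findIdx_le_length

theorem pvCut_lt_ne (xs : List String) (c : Nat) (h : c < pvCut xs) (hl : c < xs.length) :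
    xs[c]! ≠ "bye" := by
  have := List.not_of_lt_findIdx h
  simpa [List.getElem!_eq_getElem?_getD, List.getElem?_eq_getElem hl] using this

theorem pvCut_bye (xs : List String) (h : pvCut xs < xs.length) :
    xs[pvCut xs]! = "bye" := by
  have := List.findIdx_getElem (w := h) (xs := xs) (p := (· = "bye"))
  simpa [List.getElem!_eq_getElem?_getD, List.getElem?_eq_getElem h] using this

theorem pvAlt_eq (xs : List String) :
    beginning_alt xs = xs.take (min (pvCut xs) 10) := by
  unfold beginning_alt
  rcases h : PySem.List.index? xs "bye" with _ | i
  · have hnm : "bye" ∉ xs := (PySem.List.index?_eq_none_iff xs "bye").mp h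
    have : pvCut xs = xs.length := by
      unfold pvCut
      rw [List.findIdx_eq_length]
      intro x hx
      simp only [decide_eq_false_iff_not]
      exact fun hxb => hnm (hxb ▸ hx)
    simp [this]
  · obtain ⟨hk, hget, hfirst⟩ := PySem.List.getElem_of_index?_eq_some h
    have hcut : pvCut xs = i := by
      have h1 : pvCut xs ≤ i := by
        by_contra hlt
        push Not at hlt
        have := List.not_of_lt_findIdx (p := (· = "bye")) (xs := xs) (i := i) hlt
        exact absurd hget (by simpa using this)
      have h2 : i ≤ pvCut xs := by
        by_contra hlt
        push Not at hlt
        have hl : pvCut xs < xs.length := lt_of_lt_of_le hlt (by omega)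
        have := List.findIdx_getElem (p := (· = "bye")) (xs := xs) (w := hl)
        simp only [decide_eq_true_eq] at this
        exact hfirst _ hlt this
      omega
    simp [hcut]

theorem pvLoop_eq_aux (xs : List String) :
    ∀ (k c : Nat), xs.length - c ≤ k → c < 10 → c ≤ pvCut xs →
      beginningLoop xs (xs.take c) c = xs.take (min (pvCut xs) 10) := by
  intro k
  induction k with
  | zero =>
    intro c hk hc10 hccut
    -- c ≥ length: the loop guard fails immediately and pvCut = c
    have hlen : xs.length ≤ c := by omega
    have hcut : pvCut xs = c := le_antisymm (le_trans (pvCut_le xs) hlen) hccut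
    rw [beginningLoop]
    rw [dif_neg (by omega)]
    rw [hcut]
    have hm : min c 10 = c := by omega
    rw [hm]
  | succ k ih =>
    intro c hk hc10 hccut
    rw [beginningLoop]
    by_cases h : c < xs.length ∧ xs[c]! ≠ "bye"
    · rw [dif_pos h]
      obtain ⟨hlt, hne⟩ := h
      have htake : xs.take c ++ [xs[c]!] = xs.take (c + 1) := by
        rw [List.take_add_one, List.getElem?_eq_getElem hlt]
        simp [List.getElem!_eq_getElem?_getD, List.getElem?_eq_getElem hlt]
      have hlen' : (xs.take c ++ [xs[c]!]).length = c + 1 := by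
        simp [List.length_take]
        omega
      have hcut' : c + 1 ≤ pvCut xs := by
        rcases Nat.lt_or_ge c (pvCut xs) with h1 | h1
        · omega
        · have hcc : pvCut xs = c := le_antisymm h1 hccut
          have : pvCut xs < xs.length := hcc ▸ hlt
          exact absurd (pvCut_bye xs this) (hcc ▸ hne)
      by_cases hbrk : (xs.take c ++ [xs[c]!]).length ≥ 10
      · rw [if_pos hbrk]
        have hc9 : c + 1 = 10 := by omega
        rw [htake, hc9]
        have : min (pvCut xs) 10 = 10 := by omega
        rw [this]
      · rw [if_neg hbrk]
        rw [htake]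
        exact ih (c + 1) (by omega) (by omega) hcut'
    · rw [dif_neg h]
      -- guard false: either c ≥ length or xs[c] = "bye"; in both cases pvCut = c
      have hcut : pvCut xs = c := by
        rcases Nat.lt_or_ge c xs.length with hlt | hge
        · have hbye : xs[c]! = "bye" := by
            by_contra hne
            exact h ⟨hlt, hne⟩
          rcases Nat.lt_or_ge c (pvCut xs) with h1 | h1
          · exact absurd (pvCut_lt_ne xs c h1 hlt) (by simp [hbye])
          · omega
        · exact le_antisymm (le_trans (pvCut_le xs) hge) hccut
      rw [hcut]
      have : min c 10 = c := by omega
      rw [this]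

theorem pvLoop_eq (xs : List String) (c : Nat) (hc10 : c < 10) (hccut : c ≤ pvCut xs) :
    beginningLoop xs (xs.take c) c = xs.take (min (pvCut xs) 10) :=
  pvLoop_eq_aux xs xs.length c (by omega) hc10 hccut

theorem beginning_spec : Claim_equal_beginning := by
  intro xs _
  unfold Spec_beginning beginning
  rw [pvAlt_eq]
  simpa using pvLoop_eq xs 0 (by omega) (by omega)
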